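-- pv_equiv track=rewrite | github.com/MEIGA-tk/MEIGA-PAV | modules/gRanges.py | makeGenomicBins
-- ===== SOURCE A (Python) =====
-- def makeGenomicBins(refLengths, binSize, targetRefs):
--     '''
--     Split the genome into a set of non overlapping bins of 'binSize' bp.
--
--     Input:
--         1. refLengths: Dictionary containing reference ids as keys and as values the length
--         2. binSize: size of the bins
--         3. targetRefs: list of target references. None if all the references are considered
--
--     Output:
--         1. bins: List of non overlapping bins. Each list item corresponds to a tuple (ref, beg, end)
--     '''
--     ## Select target references
--     if targetRefs != None:
--         targetRefs = [str(i) for i in targetRefs]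
--         refLengths  = {ref: refLengths [ref] for ref in targetRefs}
--
--     ## Split each reference into evenly sized bins
--     bins = []
--
--     # For each reference
--     for ref, length in refLengths .items():
--
--         ## Define bins boundaries
--         boundaries = [boundary for boundary in range(0, length, binSize)]
--         boundaries = boundaries + [length]
--
--         ## Make bins
--         for idx, beg in enumerate(boundaries):
--
--             ## Skip last element from the list
--             if beg < boundaries[-1]:
--                 end = boundaries[idx + 1]
--                 window = (ref, beg, end)
--                 bins.append(window)
--
--     return bins
-- ===== SOURCE B (Python) =====
-- def makeGenomicBins(refLengths, binSize, targetRefs):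
--     ## Select target references (same as original)
--     if targetRefs != None:
--         targetRefs = [str(i) for i in targetRefs]
--         refLengths = {ref: refLengths[ref] for ref in targetRefs}
--
--     ## One pass: each bin's end is the arithmetic clamp of beg + binSize
--     return [(ref, beg, min(beg + binSize, length))
--             for ref, length in refLengths.items()
--             for beg in range(0, length, binSize) if beg < length]
-- ===== Notes on version B (the rewrite author's own statement) =====
-- stated objective: simpler
-- what changed: B drops A's per-reference boundaries table and its enumerate/index pairing of consecutive boundaries: a single comprehension walks range(0, length, binSize) once and derives each bin's end arithmetically as min(beg + binSize, length).
-- outside the precondition, e.g. on makeGenomicBins({}, 0, None): A returns [], B returns []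
import Mathlib
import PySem

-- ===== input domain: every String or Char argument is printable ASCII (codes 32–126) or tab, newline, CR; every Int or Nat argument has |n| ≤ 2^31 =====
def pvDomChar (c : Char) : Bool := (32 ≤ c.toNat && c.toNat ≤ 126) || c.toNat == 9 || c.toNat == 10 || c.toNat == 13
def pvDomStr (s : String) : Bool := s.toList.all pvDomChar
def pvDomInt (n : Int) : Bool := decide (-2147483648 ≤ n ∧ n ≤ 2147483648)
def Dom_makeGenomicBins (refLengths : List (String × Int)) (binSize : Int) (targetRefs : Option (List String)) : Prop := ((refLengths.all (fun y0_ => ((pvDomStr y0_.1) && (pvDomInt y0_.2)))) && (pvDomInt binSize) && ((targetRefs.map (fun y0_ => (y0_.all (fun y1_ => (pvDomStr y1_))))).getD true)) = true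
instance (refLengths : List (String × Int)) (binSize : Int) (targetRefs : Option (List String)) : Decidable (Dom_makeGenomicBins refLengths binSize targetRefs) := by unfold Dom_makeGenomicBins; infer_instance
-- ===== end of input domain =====

-- B replaces A's per-reference boundaries table and index pairing by one comprehension whose
-- bin end is the arithmetic clamp min(beg + binSize, length) (objective: simpler).

-- ===== PORT A =====
-- The target-selection block is textually identical in A and B, so both ports share this helper.
-- str(i) on a str argument is the identity; {ref: refLengths[ref] for ref in targetRefs} is a
-- PySem.Dict built left to right (refLengths[ref] would raise KeyError on a missing key — such
-- inputs are outside Pre_; the port uses .getD 0 there).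
def pvSelect (refLengths : List (String × Int)) (targetRefs : Option (List String)) : List (String × Int) :=
  match targetRefs with
  | none => refLengths
  | some ts =>
      ((ts.map (fun i => i)).foldl
        (fun d ref => PySem.Dict.insert d ref ((PySem.Dict.get? ⟨refLengths⟩ ref).getD 0))
        (PySem.Dict.empty : PySem.Dict String Int)).items

-- boundaries[-1] and boundaries[idx+1] are ported with pyGetD (default 0); Python would raise
-- only on an empty list / out-of-range index, and these accesses never are (boundaries ends
-- with length, and idx+1 is read only when beg < boundaries[-1]).
def makeGenomicBins (refLengths : List (String × Int)) (binSize : Int) (targetRefs : Option (List String)) : List (String × Int × Int) :=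
  (pvSelect refLengths targetRefs).foldl (fun bins p =>
    let boundaries := PySem.List.pyRange 0 p.2 binSize ++ [p.2]
    (PySem.List.enumerate boundaries).foldl (fun bins q =>
      if q.2 < PySem.List.pyGetD boundaries (-1) 0 then
        bins ++ [(p.1, q.2, PySem.List.pyGetD boundaries (q.1 + 1) 0)]
      else bins) bins) []

-- ===== PORT B =====
def makeGenomicBins_alt (refLengths : List (String × Int)) (binSize : Int) (targetRefs : Option (List String)) : List (String × Int × Int) :=
  (pvSelect refLengths targetRefs).flatMap (fun p =>
    ((PySem.List.pyRange 0 p.2 binSize).filter (fun beg => decide (beg < p.2))).map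
      (fun beg => (p.1, beg, min (beg + binSize) p.2)))

-- ===== PRECONDITION & SPEC =====
-- Pre_ excludes the inputs where Python A raises: binSize = 0 (range raises ValueError; when no
-- reference is iterated the loop body never runs and both A and B return []) and a targetRefs
-- entry missing from refLengths (the dict comprehension raises KeyError).
def Pre_makeGenomicBins (refLengths : List (String × Int)) (binSize : Int) (targetRefs : Option (List String)) : Prop :=
  binSize ≠ 0 ∧ ∀ r ∈ targetRefs.getD [], r ∈ refLengths.map Prod.fst
instance (refLengths : List (String × Int)) (binSize : Int) (targetRefs : Option (List String)) : Decidable (Pre_makeGenomicBins refLengths binSize targetRefs) := by unfold Pre_makeGenomicBins; infer_instance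

def pvWitness_makeGenomicBins : (List (String × Int)) × Int × Option (List String) :=
  ([("chr1", 10), ("chr2", 7)], 3, some ["chr2", "chr1"])

def Spec_makeGenomicBins (refLengths : List (String × Int)) (binSize : Int) (targetRefs : Option (List String)) (out : List (String × Int × Int)) : Prop := out = makeGenomicBins_alt refLengths binSize targetRefs
instance (refLengths : List (String × Int)) (binSize : Int) (targetRefs : Option (List String)) (out : List (String × Int × Int)) : Decidable (Spec_makeGenomicBins refLengths binSize targetRefs out) := by unfold Spec_makeGenomicBins; infer_instance

-- ===== CLAIM (what is proved, stated in full; the proofs are below) =====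
def Claim_equal_makeGenomicBins : Prop := ∀ (refLengths : List (String × Int)) (binSize : Int) (targetRefs : Option (List String)), Dom_makeGenomicBins refLengths binSize targetRefs → Pre_makeGenomicBins refLengths binSize targetRefs → Spec_makeGenomicBins refLengths binSize targetRefs (makeGenomicBins refLengths binSize targetRefs)

-- ===== LEMMAS AND PROOFS =====

-- boundaries[-1] is the appended final boundary
lemma pvLast_boundary (R : List Int) (L : Int) : PySem.List.pyGetD (R ++ [L]) (-1) 0 = L := by
  simp [PySem.List.pyGetD, PySem.List.pyGet?, PySem.List.pyIdx?]

-- for a negative step, no range element lies left of the stop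
lemma pvRange_mem_not_lt_of_neg {L s : Int} (hneg : s < 0) :
    ∀ x ∈ PySem.List.pyRange 0 L s, ¬ x < L := by
  intro x hx
  rw [PySem.List.pyRange] at hx
  rw [if_neg (by omega), if_neg (by omega)] at hx
  by_cases hL : L < 0
  · rw [if_pos hL] at hx
    simp only [List.mem_map, List.mem_range] at hx
    obtain ⟨k, hk, rfl⟩ := hx
    set t : Int := -s with ht
    set a : Int := 0 - L + -s - 1 with ha
    have h1 : (a / t) * t + a % t = a := Int.ediv_mul_add_emod a t
    have h2 : 0 ≤ a % t := Int.emod_nonneg a (by omega)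
    have h3 : a % t < t := Int.emod_lt_of_pos a (by omega)
    have hq : 0 ≤ a / t := Int.ediv_nonneg (by omega) (by omega)
    have hk' : (k : Int) ≤ a / t - 1 := by omega
    have hmul : t * (k : Int) ≤ t * (a / t - 1) :=
      mul_le_mul_of_nonneg_left hk' (by omega)
    nlinarith [hmul, h1]
  · rw [if_neg hL] at hx
    simp at hx

-- for a positive step, boundaries[idx+1] is the arithmetic clamp of the idx-th boundary
lemma pvNext_boundary {L s : Int} (hpos : 0 < s) (k : Nat)
    (hk : k < (PySem.List.pyRange 0 L s).length) :
    PySem.List.pyGetD (PySem.List.pyRange 0 L s ++ [L]) ((0 + (k : Int)) + 1) 0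
      = min ((PySem.List.pyRange 0 L s)[k] + s) L := by
  have hcast : (0 + (k : Int)) + 1 = ((k + 1 : Nat) : Int) := by push_cast; ring
  rw [hcast, PySem.List.pyGetD_natCast]
  have hRdef := PySem.List.pyRange_of_pos 0 L hpos
  have hmem : ∀ x ∈ PySem.List.pyRange 0 L s, x < L := fun x hx =>
    ((PySem.List.mem_pyRange_iff_of_pos hpos x).1 hx).2.1
  have hget : ∀ (j : Nat), j < (PySem.List.pyRange 0 L s).length →
      (PySem.List.pyRange 0 L s)[j]? = some (0 + s * (j : Int)) := by
    intro j hj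
    rw [hRdef] at hj ⊢
    simp only [List.getElem?_map]
    rw [List.getElem?_range (by simpa using hj)]; rfl
  have hk0 : (PySem.List.pyRange 0 L s)[k] = 0 + s * (k : Int) := by
    have h1 := hget k hk
    rw [List.getElem?_eq_getElem hk] at h1
    exact Option.some.inj h1
  have hlen : (PySem.List.pyRange 0 L s).length
      = (if 0 < L then ((L - 0 + s - 1) / s).toNat else 0) := by
    rw [hRdef]; simp
  by_cases hk1 : k + 1 < (PySem.List.pyRange 0 L s).length
  · rw [List.getD_eq_getElem?_getD, List.getElem?_append_left hk1, hget (k+1) hk1]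
    have h2 : (0 + s * ((k+1 : Nat) : Int)) < L :=
      hmem _ (List.mem_of_getElem? (hget (k+1) hk1))
    rw [hk0]
    simp only [Option.getD_some]
    rw [min_eq_left (by push_cast at h2 ⊢; nlinarith)]
    push_cast; ring
  · rw [List.getD_eq_getElem?_getD, List.getElem?_append_right (by omega),
        show k + 1 - (PySem.List.pyRange 0 L s).length = 0 from by omega]
    simp only [List.getElem?_cons_zero, Option.getD_some]
    have hL0 : 0 < L := by
      by_contra h
      rw [if_neg h] at hlen
      omega
    rw [if_pos hL0] at hlen
    have h1 : ((L - 0 + s - 1) / s) * s + (L - 0 + s - 1) % s = L - 0 + s - 1 :=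
      Int.ediv_mul_add_emod _ _
    have h2 : 0 ≤ (L - 0 + s - 1) % s := Int.emod_nonneg _ (by omega)
    have h3 : (L - 0 + s - 1) % s < s := Int.emod_lt_of_pos _ hpos
    have hq : 0 ≤ (L - 0 + s - 1) / s := Int.ediv_nonneg (by omega) (by omega)
    have hkq : (k : Int) = (L - 0 + s - 1) / s - 1 := by omega
    rw [hk0, min_eq_right (by nlinarith)]

-- per-reference equality of the two bin constructions
lemma pvBinsFor (ref : String) (L s : Int) (hs : s ≠ 0) (bins : List (String × Int × Int)) :
    (PySem.List.enumerate (PySem.List.pyRange 0 L s ++ [L])).foldl (fun bins q =>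
      if q.2 < PySem.List.pyGetD (PySem.List.pyRange 0 L s ++ [L]) (-1) 0 then
        bins ++ [(ref, q.2, PySem.List.pyGetD (PySem.List.pyRange 0 L s ++ [L]) (q.1 + 1) 0)]
      else bins) bins
    = bins ++ ((PySem.List.pyRange 0 L s).filter (fun beg => decide (beg < L))).map
        (fun beg => (ref, beg, min (beg + s) L)) := by
  simp only [pvLast_boundary]
  have hfun : (fun (bins : List (String × Int × Int)) (q : Int × Int) =>
      if q.2 < L then
        bins ++ [(ref, q.2, PySem.List.pyGetD (PySem.List.pyRange 0 L s ++ [L]) (q.1 + 1) 0)]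
      else bins)
    = (fun bins q =>
        if (fun (q : Int × Int) => decide (q.2 < L)) q = true then
          bins ++ [(fun (q : Int × Int) =>
            (ref, q.2, PySem.List.pyGetD (PySem.List.pyRange 0 L s ++ [L]) (q.1 + 1) 0)) q]
        else bins) := by
    funext bins q; simp
  rw [hfun, PySem.List.foldl_append_if]
  congr 1
  rcases lt_or_gt_of_ne hs with hneg | hpos
  · have hmem := pvRange_mem_not_lt_of_neg (L := L) hneg
    have h1 : (PySem.List.enumerate (PySem.List.pyRange 0 L s ++ [L]) 0).filter
        (fun q => decide (q.2 < L)) = [] := by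
      rw [List.filter_eq_nil_iff]
      intro q hq
      have hq2 : q.2 ∈ PySem.List.pyRange 0 L s ++ [L] := by
        rw [← PySem.List.map_snd_enumerate (PySem.List.pyRange 0 L s ++ [L]) 0]
        exact List.mem_map_of_mem hq
      rcases List.mem_append.1 hq2 with h | h
      · simpa using hmem _ h
      · simp at h
        simp [h]
    have h2 : (PySem.List.pyRange 0 L s).filter (fun beg => decide (beg < L)) = [] := by
      rw [List.filter_eq_nil_iff]
      intro x hx
      simpa using hmem x hx
    rw [h1, h2]
    rfl
  · have hmem : ∀ x ∈ PySem.List.pyRange 0 L s, x < L := fun x hx =>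
      ((PySem.List.mem_pyRange_iff_of_pos hpos x).1 hx).2.1
    rw [List.filter_eq_self.2 (fun x hx => decide_eq_true (hmem x hx))]
    rw [PySem.List.enumerate_append, List.filter_append]
    have hsingle : (PySem.List.enumerate [L] (0 + (PySem.List.pyRange 0 L s).length)).filter
        (fun q => decide (q.2 < L)) = [] := by
      simp [PySem.List.enumerate_cons, PySem.List.enumerate_nil]
    have hall : (PySem.List.enumerate (PySem.List.pyRange 0 L s) 0).filter
        (fun q => decide (q.2 < L)) = PySem.List.enumerate (PySem.List.pyRange 0 L s) 0 := by
      apply List.filter_eq_self.2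
      intro q hq
      obtain ⟨k, hkl, rfl⟩ := (PySem.List.mem_enumerate_iff _ _ q).1 hq
      exact decide_eq_true (hmem _ (List.getElem_mem hkl))
    rw [hsingle, hall, List.append_nil]
    apply List.ext_getElem
    · simp [PySem.List.length_enumerate]
    · intro k h1 h2
      rw [List.getElem_map, List.getElem_map, PySem.List.getElem_enumerate]
      have hkR : k < (PySem.List.pyRange 0 L s).length := by
        simpa [PySem.List.length_enumerate] using h1
      simp only
      rw [pvNext_boundary hpos k hkR]

-- ===== VERDICT (by name: the statement is the Claim_ definition above) =====
theorem makeGenomicBins_spec : Claim_equal_makeGenomicBins := by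
  intro refLengths binSize targetRefs _hDom hPre
  unfold Spec_makeGenomicBins makeGenomicBins makeGenomicBins_alt
  conv_rhs => rw [← List.nil_append (List.flatMap _ _)]
  rw [← PySem.List.foldl_append_eq_flatMap]
  apply PySem.List.foldl_congr_mem
  intro bins p _
  exact pvBinsFor p.1 p.2 binSize hPre.1 bins
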